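-- pv_equiv track=rewrite | github.com/georgeforoglou/Unstructured-file-parser | parser.py | find_duration
-- ===== SOURCE A (Python) =====
-- def find_duration(data, operation):
--     # Start serching after the name of the operation
--     operations_position = data.find(operation) + len(operation)
--     duration = ''
--     for char in data[operations_position:]:
--         # Skip empty spaces
--         if char != ' ':
--             duration += char
--         # End when you find s (seconds)
--         if char == 's':
--             return duration
-- ===== SOURCE B (Python) =====
-- def find_duration(data, operation):
--     # Locate the terminating 's' directly, then slice and strip spaces.
--     operations_position = data.find(operation) + len(operation)
--     idx = data.find('s', operations_position)
--     if idx == -1: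
--         return None
--     return data[operations_position:idx + 1].replace(' ', '')
-- ===== Notes on version B (the rewrite author's own statement) =====
-- stated objective: simpler
-- what changed: Replaces the character-by-character accumulation loop with early return by a direct find of the terminating 's' from the operation's end position, then one slice up to and including it and a single replace(' ','') pass.
import Mathlib
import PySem

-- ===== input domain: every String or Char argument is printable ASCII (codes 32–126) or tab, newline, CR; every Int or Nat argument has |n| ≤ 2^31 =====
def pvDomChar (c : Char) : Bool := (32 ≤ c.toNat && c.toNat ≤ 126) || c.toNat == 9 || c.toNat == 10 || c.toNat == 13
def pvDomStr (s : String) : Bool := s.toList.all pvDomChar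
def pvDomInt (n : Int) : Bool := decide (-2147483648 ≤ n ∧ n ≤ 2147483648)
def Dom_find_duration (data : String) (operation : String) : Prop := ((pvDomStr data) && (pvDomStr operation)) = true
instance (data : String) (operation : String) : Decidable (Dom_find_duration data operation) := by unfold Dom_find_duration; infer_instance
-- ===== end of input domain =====

-- B replaces A's character-by-character accumulation loop with a direct find of the
-- terminating 's', one slice and one space-removal pass (objective: simpler).

-- ===== PORT A =====
-- A's for-loop: state = accumulated duration; early return at 's', none at exhaustion
def findDurLoop : List Char → List Char → Option String
  | [], _ => none
  | c :: rest, duration =>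
    let duration' := if c ≠ ' ' then duration ++ [c] else duration
    if c = 's' then some (String.ofList duration') else findDurLoop rest duration'

def find_duration (data : String) (operation : String) : Option String :=
  let operations_position : Int := PySem.Str.find data operation + (PySem.Str.len operation : Int)
  findDurLoop (PySem.List.slice data.toList (some operations_position) none) []

-- ===== PORT B =====
def find_duration_alt (data : String) (operation : String) : Option String :=
  let operations_position : Int := PySem.Str.find data operation + (PySem.Str.len operation : Int)
  let idx : Int := PySem.Str.findFrom data "s" operations_position
  if idx = -1 then none
  else some (PySem.Str.replace (PySem.Str.slice data (some operations_position) (some (idx + 1))) " " "")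

-- ===== PRECONDITION & SPEC =====
def Spec_find_duration (data : String) (operation : String) (out : Option String) : Prop := out = find_duration_alt data operation
instance (data : String) (operation : String) (out : Option String) : Decidable (Spec_find_duration data operation out) := by unfold Spec_find_duration; infer_instance

-- ===== CLAIM (what is proved, stated in full; the proofs are below) =====
def Claim_equal_find_duration : Prop := ∀ (data : String) (operation : String), Dom_find_duration data operation → Spec_find_duration data operation (find_duration data operation)

-- ===== LEMMAS AND PROOFS =====

-- the search position after the operation name is never negative
lemma pos_nonneg (data operation : String) :
    0 ≤ PySem.Str.find data operation + (PySem.Str.len operation : Int) := by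
  have h1 := PySem.Chars.neg_one_le_find data.toList operation.toList
  by_cases h : operation.toList = []
  · simp [PySem.Str.find_eq, PySem.Str.len_eq, h, PySem.Chars.find_nil]
  · have h2 : 0 < operation.toList.length := List.length_pos_of_ne_nil h
    simp only [PySem.Str.find_eq, PySem.Str.len_eq]
    omega

lemma singleton_prefix_iff (t : List Char) (a : Char) : [a] <+: t ↔ t.head? = some a := by
  constructor
  · rintro ⟨u, rfl⟩; simp
  · intro h; cases t with
    | nil => simp at h
    | cons b u => simp at h; exact ⟨u, by simp [h]⟩

lemma find_single_mem_iff (l : List Char) (a : Char) :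
    PySem.Chars.find l [a] = -1 ↔ a ∉ l := by
  rw [PySem.Chars.find_eq_neg_one_iff, List.singleton_infix_iff]

-- find of a single character returns the first index carrying it
lemma find_single_eq (l : List Char) (a : Char) (n : Nat)
    (h1 : l[n]? = some a) (h2 : ∀ i < n, l[i]? ≠ some a) :
    PySem.Chars.find l [a] = (n : Int) := by
  have hne : PySem.Chars.find l [a] ≠ -1 := by
    intro h; rw [find_single_mem_iff] at h
    exact h (List.mem_of_getElem? h1)
  have hge : 0 ≤ PySem.Chars.find l [a] := by
    have := PySem.Chars.neg_one_le_find l [a]; omega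
  obtain ⟨hp, hmin⟩ := PySem.Chars.find_spec hge
  set m := (PySem.Chars.find l [a]).toNat with hm
  have hpm : l[m]? = some a := by
    rw [← List.head?_drop]; exact (singleton_prefix_iff _ _).1 hp
  rcases lt_trichotomy m n with h | h | h
  · exact absurd hpm (h2 m h)
  · omega
  · exact absurd ((singleton_prefix_iff _ _).2 (by rw [List.head?_drop]; exact h1)) (hmin n h)

-- cons step for the first occurrence of 's'
lemma find_s_cons (c : Char) (l : List Char) :
    PySem.Chars.find (c :: l) ['s'] =
      if c = 's' then 0
      else if PySem.Chars.find l ['s'] = -1 then -1 else PySem.Chars.find l ['s'] + 1 := by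
  by_cases hc : c = 's'
  · simp only [hc, if_true]
    exact find_single_eq _ _ 0 (by simp) (by omega)
  · simp only [hc, if_false]
    by_cases hf : PySem.Chars.find l ['s'] = -1
    · simp only [hf, if_true]
      rw [find_single_mem_iff] at hf ⊢
      simp [hf]
      exact fun h => hc h.symm
    · simp only [hf, if_false]
      have hge : 0 ≤ PySem.Chars.find l ['s'] := by
        have := PySem.Chars.neg_one_le_find l ['s']; omega
      obtain ⟨hp, hmin⟩ := PySem.Chars.find_spec hge
      set m := (PySem.Chars.find l ['s']).toNat with hm
      have heq : PySem.Chars.find (c :: l) ['s'] = ((m + 1 : Nat) : Int) := by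
        apply find_single_eq
        · simpa [List.getElem?_cons_succ, ← List.head?_drop] using (singleton_prefix_iff _ _).1 hp
        · intro i hi
          cases i with
          | zero => simpa using hc
          | succ j =>
            have hj : j < m := by omega
            have := hmin j hj
            rw [singleton_prefix_iff, List.head?_drop] at this
            simpa using this
      rw [heq]; push_cast; omega

-- str.replace(' ', '') is a filter
lemma replace_go_space (fuel : Nat) : ∀ (l acc : List Char), l.length ≤ fuel →
    PySem.Chars.replace.go [' '] [] fuel l acc = acc.reverse ++ l.filter (fun c => c ≠ ' ') := by
  induction fuel with
  | zero => intro l acc h; simp at h; simp [h, PySem.Chars.replace.go]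
  | succ n ih =>
    intro l acc h
    cases l with
    | nil => simp [PySem.Chars.replace.go]
    | cons c t =>
      simp only [PySem.Chars.replace.go, List.isPrefixOf]
      by_cases hc : c = ' '
      · simp [hc, ih t acc (by simpa using h)]
      · have : (' ' == c) = false := by simp [Ne.symm hc]
        simp [this, ih t (c :: acc) (by simpa using h), hc]

lemma replace_space (l : List Char) :
    PySem.Chars.replace l [' '] [] = l.filter (fun c => c ≠ ' ') := by
  have := replace_go_space l.length l [] le_rfl
  simpa [PySem.Chars.replace] using this

-- A's loop in closed form: none iff no 's', else everything up to and including the first 's', spaces removed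
lemma loop_eq (l : List Char) : ∀ (acc : List Char),
    findDurLoop l acc =
      if PySem.Chars.find l ['s'] = -1 then none
      else some (String.ofList (acc ++ (l.take ((PySem.Chars.find l ['s']).toNat + 1)).filter (fun c => c ≠ ' '))) := by
  induction l with
  | nil =>
    intro acc
    have : PySem.Chars.find ([] : List Char) ['s'] = -1 := by simp [find_single_mem_iff]
    simp [findDurLoop, this]
  | cons c t ih =>
    intro acc
    rw [find_s_cons]
    by_cases hc : c = 's'
    · simp [findDurLoop, hc]
    · by_cases hf : PySem.Chars.find t ['s'] = -1
      · simp only [hc, if_false, hf, if_true]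
        simp [findDurLoop, hc, ih]
        exact hf
      · have hge : 0 ≤ PySem.Chars.find t ['s'] := by
          have := PySem.Chars.neg_one_le_find t ['s']; omega
        have htn : (PySem.Chars.find t ['s'] + 1).toNat = (PySem.Chars.find t ['s']).toNat + 1 := by omega
        simp only [hc, if_false, hf, if_neg (by omega : ¬ PySem.Chars.find t ['s'] + 1 = -1)]
        rw [show findDurLoop (c :: t) acc = findDurLoop t (if c ≠ ' ' then acc ++ [c] else acc) by
              simp [findDurLoop, hc]]
        rw [ih]
        simp only [hf, if_false, htn]
        by_cases hsp : c = ' '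
        · simp [hsp, List.take_succ_cons]
        · simp [hsp, List.take_succ_cons]

-- str.find(sub, start) with start past the end of the string is -1
lemma findFrom_oob (l sub : List Char) (p : Int) (h : (l.length : Int) < p) :
    PySem.Chars.findFrom l sub p none = -1 := by
  have hp : ¬ p < 0 := by omega
  simp only [PySem.Chars.findFrom, hp, if_false]
  rw [if_pos h]

-- ===== VERDICT (by name: the statement is the Claim_ definition above) =====
theorem find_duration_spec : Claim_equal_find_duration := by
  intro data operation _
  unfold Spec_find_duration find_duration find_duration_alt
  set pos : Int := PySem.Str.find data operation + (PySem.Str.len operation : Int) with hposdef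
  have hpos : 0 ≤ pos := pos_nonneg data operation
  set L := data.toList with hL
  change findDurLoop (PySem.List.slice L (some pos) none) [] =
    (if PySem.Str.findFrom data "s" pos = -1 then none
     else some (PySem.Str.replace (PySem.Str.slice data (some pos) (some (PySem.Str.findFrom data "s" pos + 1))) " " ""))
  have hslice : PySem.List.slice L (some pos) none = L.drop pos.toNat :=
    PySem.List.slice_from L hpos
  by_cases hk : pos.toNat ≤ L.length
  · -- position inside the string
    have hcast : pos = ((pos.toNat : Nat) : Int) := by omega
    have hff : PySem.Str.findFrom data "s" pos =
        (if PySem.Chars.find (L.drop pos.toNat) ['s'] = -1 then -1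
         else (pos.toNat : Int) + PySem.Chars.find (L.drop pos.toNat) ['s']) := by
      rw [PySem.Str.findFrom_eq, hcast]
      exact PySem.Chars.findFrom_natCast L (String.toList "s") pos.toNat hk
    by_cases hf : PySem.Chars.find (L.drop pos.toNat) ['s'] = -1
    · rw [hslice, loop_eq, if_pos hf, hff, if_pos hf]
      simp
    · have hge : 0 ≤ PySem.Chars.find (L.drop pos.toNat) ['s'] := by
        have := PySem.Chars.neg_one_le_find (L.drop pos.toNat) ['s']; omega
      set f := PySem.Chars.find (L.drop pos.toNat) ['s'] with hfdef
      rw [hslice, loop_eq, if_neg hf, hff, if_neg hf]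
      rw [if_neg (by omega : ¬ (pos.toNat : Int) + f = -1)]
      refine congrArg some (String.ofList_eq.mpr ?_)
      rw [PySem.Str.toList_replace, PySem.Str.toList_slice]
      rw [PySem.Chars.slice_eq_listSlice]
      have hb : (pos.toNat : Int) + f + 1 = (((pos.toNat + f.toNat + 1 : Nat)) : Int) := by omega
      rw [hb, hcast, PySem.List.slice_natCast]
      simp only [Int.toNat_natCast]
      have htake : pos.toNat + f.toNat + 1 - pos.toNat = f.toNat + 1 := by omega
      rw [htake]
      rw [show (" " : String).toList = [' '] from rfl, show ("" : String).toList = [] from rfl]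
      rw [replace_space]
      simp only [List.nil_append, ← hfdef]
      rfl
  · -- position past the end: the sliced tail is empty and find('s', pos) is -1
    have hempty : L.drop pos.toNat = [] := List.drop_eq_nil_of_le (by omega)
    have hfind : PySem.Str.findFrom data "s" pos = -1 := by
      rw [PySem.Str.findFrom_eq]
      exact findFrom_oob L _ pos (by omega)
    rw [hslice, hempty, hfind, if_pos rfl]
    simp [findDurLoop]
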